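-- pv_equiv track=rewrite | github.com/Bobcatsoap/jy-server | cell/ZJHCalculator.py | calculatorBaozi
-- ===== SOURCE A (Python) =====
-- _cardWeight = [
--             1, 1, 1, 1,
--             2, 2, 2, 2,
--             3, 3, 3, 3,
--             4, 4, 4, 4,
--             5, 5, 5, 5,
--             6, 6, 6, 6,
--             7, 7, 7, 7,
--             8, 8, 8, 8,
--             9, 9, 9, 9,
--             10, 10, 10, 10,
--             11, 11, 11, 11,
--             12, 12, 12, 12,
--             13, 13, 13, 13
--         ]
--
-- def calculatorBaozi(_cards):
--     _weightSet = {}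
--     for _card in _cards:
--         _weight = _cardWeight[_card]
--         if _weight in _weightSet.keys():
--             _weightSet[_weight] += 1
--         else:
--             _weightSet[_weight] = 1
--     for k, v in _weightSet.items():
--         if v == 3:
--             return True
--     return False
-- ===== SOURCE B (Python) =====
-- _cardWeight = [
--             1, 1, 1, 1,
--             2, 2, 2, 2,
--             3, 3, 3, 3,
--             4, 4, 4, 4,
--             5, 5, 5, 5,
--             6, 6, 6, 6,
--             7, 7, 7, 7,
--             8, 8, 8, 8,
--             9, 9, 9, 9,
--             10, 10, 10, 10,
--             11, 11, 11, 11,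
--             12, 12, 12, 12,
--             13, 13, 13, 13
--         ]
--
-- def calculatorBaozi(_cards):
--     ws = sorted(_cardWeight[c] for c in _cards)
--     i, n = 0, len(ws)
--     while i < n:
--         j = i
--         while j < n and ws[j] == ws[i]:
--             j += 1
--         if j - i == 3:
--             return True
--         i = j
--     return False
-- ===== Notes on version B (the rewrite author's own statement) =====
-- stated objective: alternative
-- what changed: A builds a mutable count dictionary in one pass and then scans its entries for a value of 3; B sorts the mapped weights and scans the sorted list with a two-index run-length walk, returning True exactly when some run has length 3 - no counting structure at all.
import Mathlib
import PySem

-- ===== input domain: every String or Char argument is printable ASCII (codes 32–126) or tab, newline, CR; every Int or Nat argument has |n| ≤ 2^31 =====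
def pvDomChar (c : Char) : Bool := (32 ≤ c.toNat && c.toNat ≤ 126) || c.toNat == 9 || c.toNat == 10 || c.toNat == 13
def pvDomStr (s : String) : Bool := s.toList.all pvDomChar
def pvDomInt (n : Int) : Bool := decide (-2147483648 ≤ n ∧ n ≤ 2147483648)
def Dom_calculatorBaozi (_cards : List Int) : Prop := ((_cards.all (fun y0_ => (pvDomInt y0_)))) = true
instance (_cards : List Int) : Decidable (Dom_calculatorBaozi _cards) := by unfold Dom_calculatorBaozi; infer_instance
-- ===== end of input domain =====

-- B replaces A's mutable count dictionary by a different algorithm: map the cards to weights,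
-- sort, and scan the sorted list for a run of exactly length 3 (objective: alternative).

-- ===== PORT A =====
-- module constant _cardWeight
def cardWeight : List Int :=
  [1, 1, 1, 1, 2, 2, 2, 2, 3, 3, 3, 3, 4, 4, 4, 4, 5, 5, 5, 5,
   6, 6, 6, 6, 7, 7, 7, 7, 8, 8, 8, 8, 9, 9, 9, 9, 10, 10, 10, 10,
   11, 11, 11, 11, 12, 12, 12, 12, 13, 13, 13, 13]

-- _cardWeight[_card]: pyGetD is exact under Pre_ (Raise.InRange: the index does not raise)
def calculatorBaozi (_cards : List Int) : Bool :=
  let d := _cards.foldl (fun d _card =>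
    let _weight := PySem.List.pyGetD cardWeight _card 0
    match d.get? _weight with
    | some v => d.insert _weight (v + 1)
    | none => d.insert _weight 1) (PySem.Dict.empty : PySem.Dict Int Int)
  d.items.any (fun kv => kv.2 == 3)

-- ===== PORT B =====
-- the outer while loop of Source B over the sorted list: the inner while counts the leading run
-- of elements equal to ws[i] (takeWhile) and the scan resumes right after it (dropWhile)
def baoziRunScan : List Int → Bool
  | [] => false
  | w :: rest =>
    if 1 + (rest.takeWhile (fun x => x == w)).length == 3 then true
    else baoziRunScan (rest.dropWhile (fun x => x == w))
termination_by xs => xs.length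
decreasing_by
  simpa using Nat.lt_succ_of_le (List.Sublist.length_le (List.dropWhile_sublist _))

def calculatorBaozi_alt (_cards : List Int) : Bool :=
  baoziRunScan (PySem.List.sorted (_cards.map (fun c => PySem.List.pyGetD cardWeight c 0)) (fun x => x) false)

-- ===== PRECONDITION & SPEC =====
-- Pre_: every card index is in Python range for the 52-entry weight table (else A raises IndexError)
def Pre_calculatorBaozi (_cards : List Int) : Prop :=
  ∀ c ∈ _cards, PySem.Raise.InRange 52 c

instance (_cards : List Int) : Decidable (Pre_calculatorBaozi _cards) := by
  unfold Pre_calculatorBaozi; infer_instance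

def pvWitness_calculatorBaozi : List Int := [0, 5, 9, -44, 13]

def Spec_calculatorBaozi (_cards : List Int) (out : Bool) : Prop := out = calculatorBaozi_alt _cards
instance (_cards : List Int) (out : Bool) : Decidable (Spec_calculatorBaozi _cards out) := by unfold Spec_calculatorBaozi; infer_instance

-- ===== CLAIM (what is proved, stated in full; the proofs are below) =====
def Claim_equal_calculatorBaozi : Prop := ∀ (_cards : List Int), Dom_calculatorBaozi _cards → Pre_calculatorBaozi _cards → Spec_calculatorBaozi _cards (calculatorBaozi _cards)

-- ===== LEMMAS AND PROOFS =====

-- A-side: the dict-building step is exactly the Counter step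
theorem stepA_eq_counter_step (d : PySem.Dict Int Int) (w : Int) :
    (match d.get? w with
     | some v => d.insert w (v + 1)
     | none => d.insert w 1) = d.insert w (d.getD w 0 + 1) := by
  cases h : d.get? w with
  | some v => simp [PySem.Dict.getD_of_get?_eq_some d 0 h]
  | none => simp [PySem.Dict.getD_of_get?_eq_none d 0 h]

-- A-side: A's dict is Counter(weights)
theorem dictA_eq_counter (_cards : List Int) :
    _cards.foldl (fun d _card =>
      let _weight := PySem.List.pyGetD cardWeight _card 0
      match d.get? _weight with
      | some v => d.insert _weight (v + 1)
      | none => d.insert _weight 1) (PySem.Dict.empty : PySem.Dict Int Int)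
    = PySem.Dict.counter (_cards.map (fun c => PySem.List.pyGetD cardWeight c 0)) := by
  rw [← PySem.Dict.foldl_insert_getD_add_one_eq_counter, List.foldl_map]
  simp only [stepA_eq_counter_step]

-- B-side: in a nondecreasing list, the head does not reappear after its leading run
theorem head_not_mem_dropWhile (w : Int) (rest : List Int)
    (hs : (w :: rest).Pairwise (· ≤ ·)) : w ∉ rest.dropWhile (fun x => x == w) := by
  intro hw
  cases hd : rest.dropWhile (fun x => x == w) with
  | nil => simp [hd] at hw
  | cons x dt =>
    have hx : (x == w) = false := by
      have := List.head_dropWhile_not (fun y => y == w) (l := rest) (by simp [hd])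
      simpa [hd] using this
    have hxw : x ≠ w := by simpa using hx
    rw [hd] at hw
    rcases List.mem_cons.1 hw with h | h
    · exact hxw h.symm
    · have hpd : (x :: dt).Pairwise (· ≤ ·) := by
        rw [← hd]
        exact ((List.pairwise_cons.1 hs).2).sublist (List.dropWhile_sublist _)
      have hxle : x ≤ w := (List.pairwise_cons.1 hpd).1 w h
      have hwle : w ≤ x := (List.pairwise_cons.1 hs).1 x
        ((List.dropWhile_sublist _).subset (by rw [hd]; simp))
      exact hxw (le_antisymm hxle hwle)

-- B-side: the head's multiplicity is the leading run length
theorem count_head_eq_run (w : Int) (rest : List Int)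
    (hs : (w :: rest).Pairwise (· ≤ ·)) :
    (w :: rest).count w = 1 + (rest.takeWhile (fun x => x == w)).length := by
  have hct : (rest.takeWhile (fun x => x == w)).count w
      = (rest.takeWhile (fun x => x == w)).length := by
    rw [List.count_eq_length]
    intro b hb
    have hb2 := List.mem_takeWhile_imp hb
    exact (beq_iff_eq.1 hb2).symm
  have hsplit := List.takeWhile_append_dropWhile (p := fun x => x == w) (l := rest)
  have h1 : List.count w rest
      = List.count w (rest.takeWhile (fun x => x == w))
        + List.count w (rest.dropWhile (fun x => x == w)) := by
    conv_lhs => rw [← hsplit]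
    rw [List.count_append]
  rw [List.count_cons_self, h1, hct,
    List.count_eq_zero.2 (head_not_mem_dropWhile w rest hs)]
  omega

-- B-side: any other value's multiplicity survives dropping the leading run
theorem count_other_eq_drop (w v : Int) (rest : List Int) (hv : v ≠ w) :
    (w :: rest).count v = (rest.dropWhile (fun x => x == w)).count v := by
  have hnt : v ∉ rest.takeWhile (fun x => x == w) := by
    intro hmem
    have hm2 := List.mem_takeWhile_imp hmem
    exact hv (beq_iff_eq.1 hm2)
  have hsplit := List.takeWhile_append_dropWhile (p := fun x => x == w) (l := rest)
  have h1 : List.count v rest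
      = List.count v (rest.takeWhile (fun x => x == w))
        + List.count v (rest.dropWhile (fun x => x == w)) := by
    conv_lhs => rw [← hsplit]
    rw [List.count_append]
  have h2 : List.count v (w :: rest) = List.count v rest := by
    simp [List.count_cons]
    exact fun e => hv e.symm
  rw [h2, h1, List.count_eq_zero.2 hnt]
  omega

-- B-side: on a nondecreasing list, the run scan finds a value of multiplicity exactly 3
theorem baoziRunScan_iff (xs : List Int) (hs : xs.Pairwise (· ≤ ·)) :
    baoziRunScan xs = true ↔ ∃ w ∈ xs, xs.count w = 3 := by
  induction xs using baoziRunScan.induct with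
  | case1 => simp [baoziRunScan]
  | case2 w rest hrun =>
    rw [baoziRunScan]
    simp only [hrun, if_true, true_iff]
    refine ⟨w, by simp, ?_⟩
    rw [count_head_eq_run w rest hs]
    simpa using hrun
  | case3 w rest hrun ih =>
    rw [baoziRunScan]
    rw [if_neg (by simpa using hrun)]
    have hpd : (rest.dropWhile (fun x => x == w)).Pairwise (· ≤ ·) :=
      ((List.pairwise_cons.1 hs).2).sublist (List.dropWhile_sublist _)
    rw [ih hpd]
    constructor
    · rintro ⟨v, hv, hc⟩
      have hvw : v ≠ w := fun e => head_not_mem_dropWhile w rest hs (e ▸ hv)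
      refine ⟨v, List.mem_cons_of_mem _
        ((List.dropWhile_sublist _).subset hv), ?_⟩
      rw [count_other_eq_drop w v rest hvw]; exact hc
    · rintro ⟨v, hv, hc⟩
      by_cases hvw : v = w
      · subst hvw
        rw [count_head_eq_run v rest hs] at hc
        exact absurd (by simpa using hc) (by simpa using hrun)
      · have hvrest : v ∈ rest := by
          rcases List.mem_cons.1 hv with h | h
          · exact absurd h hvw
          · exact h
        have hvd : v ∈ rest.dropWhile (fun x => x == w) := by
          have hsplit := List.takeWhile_append_dropWhile (p := fun x => x == w) (l := rest)
          rw [← hsplit] at hvrest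
          rcases List.mem_append.1 hvrest with h | h
          · have hm2 := List.mem_takeWhile_imp h
            exact absurd (beq_iff_eq.1 hm2) hvw
          · exact h
        refine ⟨v, hvd, ?_⟩
        rw [← count_other_eq_drop w v rest hvw]; exact hc

theorem calculatorBaozi_spec : Claim_equal_calculatorBaozi := by
  intro _cards _ _
  unfold Spec_calculatorBaozi calculatorBaozi calculatorBaozi_alt
  dsimp only
  rw [dictA_eq_counter]
  set ws := _cards.map (fun c => PySem.List.pyGetD cardWeight c 0) with hws
  have hB : baoziRunScan (PySem.List.sorted ws (fun x => x) false) = true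
      ↔ ∃ w ∈ ws, ws.count w = 3 := by
    have hperm := PySem.List.sorted_perm (xs := ws) (key := fun x => x) (rev := false)
    rw [baoziRunScan_iff _ (by simpa using PySem.List.sorted_pairwise (xs := ws) (key := fun x => x))]
    constructor
    · rintro ⟨w, hw, hc⟩
      exact ⟨w, hperm.mem_iff.1 hw, by rw [← hperm.count_eq]; exact hc⟩
    · rintro ⟨w, hw, hc⟩
      exact ⟨w, hperm.mem_iff.2 hw, by rw [hperm.count_eq]; exact hc⟩
  have hA : ((PySem.Dict.counter ws).items.any (fun kv => kv.2 == 3)) = true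
      ↔ ∃ w ∈ ws, ws.count w = 3 := by
    rw [PySem.Dict.items_counter]
    simp only [List.any_map, List.any_eq_true, Function.comp, PySem.Set.mem_ofList,
      beq_iff_eq]
    constructor
    · rintro ⟨w, hw, hc⟩
      exact ⟨w, hw, by exact_mod_cast hc⟩
    · rintro ⟨w, hw, hc⟩
      exact ⟨w, hw, by exact_mod_cast hc⟩
  have h : ∀ (b c : Bool), (b = true ↔ c = true) → b = c := by decide
  exact h _ _ (hA.trans hB.symm)
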